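-- pv_equiv track=rewrite | github.com/pypi-data/pypi-mirror-403 | packages/iflow-mcp_viperjuice_code-index-mcp/iflow_mcp_viperjuice_code_index_mcp-1.0.0.tar.gz/iflow_mcp_viperjuice_code_index_mcp-1.0.0/mcp_server/plugins/swift_plugin/objc_bridge.py | _is_foundation_bridging
-- ===== SOURCE A (Python) =====
-- def _is_foundation_bridging(source_type: str, target_type: str) -> bool:
--     """Check if it's Foundation bridging."""
--     foundation_pairs = [
--         ("String", "NSString"),
--         ("Array", "NSArray"),
--         ("Dictionary", "NSDictionary"),
--         ("Set", "NSSet"),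
--         ("Data", "NSData"),
--         ("Date", "NSDate"),
--         ("URL", "NSURL"),
--         ("Int", "NSNumber"),
--         ("Double", "NSNumber"),
--     ]
--
--     for swift_type, objc_type in foundation_pairs:
--         if (source_type == swift_type and target_type == objc_type) or (
--             source_type == objc_type and target_type == swift_type
--         ):
--             return True
--
--     return False
-- ===== SOURCE B (Python) =====
-- # B derives bridging from the NS-prefix naming rule instead of a table of pairs:
-- # every bridged pair is (T, "NS"+T) for T in the simple Foundation types, plus
-- # Int/Double which both bridge to NSNumber.
-- _SIMPLE = ("String", "Array", "Dictionary", "Set", "Data", "Date", "URL")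
--
--
-- def _bridges(swift, objc):
--     if objc == "NSNumber":
--         return swift in ("Int", "Double")
--     return swift in _SIMPLE and objc == "NS" + swift
--
--
-- def _is_foundation_bridging(source_type: str, target_type: str) -> bool:
--     """Check if it's Foundation bridging."""
--     return _bridges(source_type, target_type) or _bridges(target_type, source_type)
-- ===== Notes on version B (the rewrite author's own statement) =====
-- stated objective: alternative
-- what changed: Instead of scanning a table of (swift, objc) pairs, B derives the bridging relation from the NS-prefix naming rule: a pair bridges iff the objc name is 'NS' + the swift name for one of the seven simple Foundation types, or the objc name is 'NSNumber' and the swift name is Int or Double, checked in both orientations.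
import Mathlib
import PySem

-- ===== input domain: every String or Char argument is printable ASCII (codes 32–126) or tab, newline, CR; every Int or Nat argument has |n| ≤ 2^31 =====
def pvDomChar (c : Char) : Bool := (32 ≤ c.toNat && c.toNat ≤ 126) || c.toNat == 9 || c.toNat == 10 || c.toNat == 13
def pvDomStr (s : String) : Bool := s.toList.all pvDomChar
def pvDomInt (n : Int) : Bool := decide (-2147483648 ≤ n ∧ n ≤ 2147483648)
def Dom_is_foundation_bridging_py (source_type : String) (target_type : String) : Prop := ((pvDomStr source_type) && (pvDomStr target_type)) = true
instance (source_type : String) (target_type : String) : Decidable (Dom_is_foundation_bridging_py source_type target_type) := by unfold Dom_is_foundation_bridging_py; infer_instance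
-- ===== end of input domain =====

-- B replaces A's scan over a table of swift/objc pairs by the NS-prefix naming rule
-- (objc = "NS" + swift for the seven simple types, NSNumber for Int/Double), tried in both orientations.

-- ===== PORT A =====
-- the literal foundation_pairs list of A
def pvFoundationPairs : List (String × String) :=
  [("String", "NSString"), ("Array", "NSArray"), ("Dictionary", "NSDictionary"),
   ("Set", "NSSet"), ("Data", "NSData"), ("Date", "NSDate"), ("URL", "NSURL"),
   ("Int", "NSNumber"), ("Double", "NSNumber")]

-- A's for-loop with early return, as structural recursion over the pair list
def pvLoopA (source_type target_type : String) : List (String × String) → Bool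
  | [] => false
  | (swift_type, objc_type) :: rest =>
      if (source_type == swift_type && target_type == objc_type)
         || (source_type == objc_type && target_type == swift_type) then true
      else pvLoopA source_type target_type rest

def is_foundation_bridging_py (source_type : String) (target_type : String) : Bool :=
  pvLoopA source_type target_type pvFoundationPairs

-- ===== PORT B =====
-- Source B's _SIMPLE tuple
def pvSimple : List String := ["String", "Array", "Dictionary", "Set", "Data", "Date", "URL"]

-- Source B's _bridges helper; Python's objc == "NS" + swift is ported as comparing the
-- character lists (objc.toList == 'N' :: 'S' :: swift.toList), exact for all strings
def pvBridges (swift objc : String) : Bool :=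
  if objc == "NSNumber" then swift == "Int" || swift == "Double"
  else pvSimple.contains swift && (objc.toList == 'N' :: 'S' :: swift.toList)

def is_foundation_bridging_py_alt (source_type : String) (target_type : String) : Bool :=
  pvBridges source_type target_type || pvBridges target_type source_type

-- ===== PRECONDITION & SPEC =====
def Spec_is_foundation_bridging_py (source_type : String) (target_type : String) (out : Bool) : Prop := out = is_foundation_bridging_py_alt source_type target_type
instance (source_type : String) (target_type : String) (out : Bool) : Decidable (Spec_is_foundation_bridging_py source_type target_type out) := by unfold Spec_is_foundation_bridging_py; infer_instance

-- ===== CLAIM (what is proved, stated in full; the proofs are below) =====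
def Claim_equal_is_foundation_bridging_py : Prop := ∀ (source_type : String) (target_type : String), Dom_is_foundation_bridging_py source_type target_type → Spec_is_foundation_bridging_py source_type target_type (is_foundation_bridging_py source_type target_type)

-- ===== LEMMAS AND PROOFS =====

-- A's early-return loop returns true iff some pair matches in either orientation
theorem pvLoopA_iff (s t : String) (L : List (String × String)) :
    pvLoopA s t L = true ↔ ∃ p ∈ L, (s = p.1 ∧ t = p.2) ∨ (s = p.2 ∧ t = p.1) := by
  induction L with
  | nil => simp [pvLoopA]
  | cons hd tl ih =>
    obtain ⟨a, b⟩ := hd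
    simp only [pvLoopA]
    split_ifs with h
    · simp only [Bool.or_eq_true, Bool.and_eq_true, beq_iff_eq] at h
      simp only [true_iff]
      exact ⟨(a, b), List.mem_cons_self, by tauto⟩
    · simp only [Bool.or_eq_true, Bool.and_eq_true, beq_iff_eq] at h
      push Not at h
      rw [ih]
      constructor
      · rintro ⟨p, hp, hc⟩; exact ⟨p, List.mem_cons_of_mem _ hp, hc⟩
      · rintro ⟨p, hp, hc⟩
        rcases List.mem_cons.mp hp with rfl | hp'
        · exfalso; simp only at hc; tauto
        · exact ⟨p, hp', hc⟩

-- B's one-direction check succeeds iff (swift, objc) is one of A's literal pairs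
theorem pvBridges_iff (swift objc : String) :
    pvBridges swift objc = true ↔ (swift, objc) ∈ pvFoundationPairs := by
  unfold pvBridges
  split_ifs with h
  · simp only [beq_iff_eq] at h
    subst h
    simp only [Bool.or_eq_true, beq_iff_eq, pvFoundationPairs]
    constructor
    · rintro (rfl | rfl) <;> simp
    · intro hm; rcases List.mem_cons.mp hm with hp | hm <;>
        simp_all [Prod.ext_iff]
  · simp only [beq_iff_eq] at h
    simp only [Bool.and_eq_true, List.contains_eq_mem, decide_eq_true_eq, beq_iff_eq]
    constructor
    · rintro ⟨hmem, hcat⟩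
      have hobjc : objc = String.ofList ('N' :: 'S' :: swift.toList) := by
        apply String.toList_inj.mp; rw [String.toList_ofList]; exact hcat
      fin_cases hmem <;> subst hobjc <;> decide
    · intro hm
      simp only [pvFoundationPairs, List.mem_cons, Prod.ext_iff, List.not_mem_nil, or_false] at hm
      rcases hm with ⟨rfl, rfl⟩ | ⟨rfl, rfl⟩ | ⟨rfl, rfl⟩ | ⟨rfl, rfl⟩ | ⟨rfl, rfl⟩ |
        ⟨rfl, rfl⟩ | ⟨rfl, rfl⟩ | ⟨rfl, rfl⟩ | ⟨rfl, rfl⟩ <;>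
        first
          | exact absurd rfl h
          | exact ⟨by decide, by decide⟩

-- ===== VERDICT (by name: the statement is the Claim_ definition above) =====
theorem is_foundation_bridging_py_spec : Claim_equal_is_foundation_bridging_py := by
  intro s t _
  unfold Spec_is_foundation_bridging_py is_foundation_bridging_py is_foundation_bridging_py_alt
  rw [Bool.eq_iff_iff]
  simp only [Bool.or_eq_true, pvLoopA_iff, pvBridges_iff]
  constructor
  · rintro ⟨⟨a, b⟩, hp, hc⟩
    rcases hc with ⟨rfl, rfl⟩ | ⟨rfl, rfl⟩
    · exact Or.inl hp
    · exact Or.inr hp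
  · rintro (h | h)
    · exact ⟨(s, t), h, Or.inl ⟨rfl, rfl⟩⟩
    · exact ⟨(t, s), h, Or.inr ⟨rfl, rfl⟩⟩
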